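-- pv_equiv track=rewrite | github.com/huttjames/AdventOfCode2022 | Day14/script.py | coordsFromString
-- ===== SOURCE A (Python) =====
-- def coordsFromString(string, lines):
--     string = string.split(" -> ")
--     for i in range(len(string) - 1):
--         start = string[i].split(",")
--         startTup = (int(start[0]), int(start[1]))
--         end = string[i+1].split(",")
--         endTup = (int(end[0]), int(end[1]))
--         line = ((startTup, endTup))
--         lines.append(line)
--     return lines
-- ===== SOURCE B (Python) =====
-- def coordsFromString(string, lines):
--     tokens = string.split(" -> ")
--     if len(tokens) < 2:
--         return lines
--     points = [(int(f[0]), int(f[1])) for f in (t.split(",") for t in tokens)]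
--     lines.extend(zip(points, points[1:]))
--     return lines
-- ===== Notes on version B (the rewrite author's own statement) =====
-- stated objective: alternative
-- what changed: B parses every token exactly once into a list of points and pairs consecutive points with zip(points, points[1:]), instead of A's single index loop that re-splits and re-parses each interior token twice.
import Mathlib
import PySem

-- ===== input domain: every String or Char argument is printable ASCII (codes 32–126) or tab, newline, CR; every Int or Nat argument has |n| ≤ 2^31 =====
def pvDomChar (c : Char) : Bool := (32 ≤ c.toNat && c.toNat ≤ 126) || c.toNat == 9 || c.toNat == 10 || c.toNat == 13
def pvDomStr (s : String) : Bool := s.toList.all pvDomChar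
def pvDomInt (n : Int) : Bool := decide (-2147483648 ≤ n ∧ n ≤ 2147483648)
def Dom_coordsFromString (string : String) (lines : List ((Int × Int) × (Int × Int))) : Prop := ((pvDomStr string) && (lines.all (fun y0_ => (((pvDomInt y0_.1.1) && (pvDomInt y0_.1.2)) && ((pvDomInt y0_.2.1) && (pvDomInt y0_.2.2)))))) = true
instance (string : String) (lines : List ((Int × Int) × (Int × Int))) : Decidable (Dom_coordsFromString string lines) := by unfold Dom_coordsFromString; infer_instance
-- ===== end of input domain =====

-- B parses each token once into a point list and pairs consecutive points with zip,
-- instead of A's index loop that re-splits/re-parses interior tokens twice; return value AND the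
-- in-place mutation of `lines` coincide (B extends the same list A appends to).


-- ===== PORT A =====
-- literal port of A: split on " -> " (separator nonempty, so split? is always some),
-- loop i over range(len-1), re-splitting tokens i and i+1 each iteration.
-- Indexing pyGetD: every index used is in range; int(...) failures are excluded by Pre_, so .getD is exact.
def coordsFromString (string : String) (lines : List ((Int × Int) × (Int × Int))) : List ((Int × Int) × (Int × Int)) :=
  let parts := (PySem.Str.split? string " -> ").getD []
  (PySem.List.pyRange 0 ((parts.length : Int) - 1) 1).foldl
    (fun acc i =>
      let start := (PySem.Str.split? (PySem.List.pyGetD parts i "") ",").getD []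
      let startTup : Int × Int :=
        ((PySem.Int.ofStr? (PySem.List.pyGetD start 0 "")).getD 0,
         (PySem.Int.ofStr? (PySem.List.pyGetD start 1 "")).getD 0)
      let end_ := (PySem.Str.split? (PySem.List.pyGetD parts (i + 1) "") ",").getD []
      let endTup : Int × Int :=
        ((PySem.Int.ofStr? (PySem.List.pyGetD end_ 0 "")).getD 0,
         (PySem.Int.ofStr? (PySem.List.pyGetD end_ 1 "")).getD 0)
      acc ++ [(startTup, endTup)])
    lines

-- ===== PORT B =====
-- B helper: parse one "x,y" token into a point (int(f[0]), int(f[1])); failures excluded by Pre_.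
def pvParsePoint (t : String) : Int × Int :=
  let fs := (PySem.Str.split? t ",").getD []
  (((PySem.List.pyGet? fs 0).bind PySem.Int.ofStr?).getD 0,
   ((PySem.List.pyGet? fs 1).bind PySem.Int.ofStr?).getD 0)

def coordsFromString_alt (string : String) (lines : List ((Int × Int) × (Int × Int))) : List ((Int × Int) × (Int × Int)) :=
  let tokens := (PySem.Str.split? string " -> ").getD []
  if tokens.length < 2 then lines
  else
    let points := tokens.map pvParsePoint
    lines ++ points.zip points.tail

-- ===== PRECONDITION & SPEC =====
-- Pre_ excludes exactly the inputs on which Python A raises: when there are at least two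
-- " -> "-separated tokens, every token must split on "," into (at least) two int()-parseable fields.
def Pre_coordsFromString (string : String) (_lines : List ((Int × Int) × (Int × Int))) : Prop :=
  let parts := (PySem.Str.split? string " -> ").getD []
  2 ≤ parts.length → ∀ t ∈ parts,
    let fs := (PySem.Str.split? t ",").getD []
    (((PySem.List.pyGet? fs 0).bind PySem.Int.ofStr?).isSome
      ∧ ((PySem.List.pyGet? fs 1).bind PySem.Int.ofStr?).isSome)
instance (string : String) (lines : List ((Int × Int) × (Int × Int))) : Decidable (Pre_coordsFromString string lines) := by unfold Pre_coordsFromString; infer_instance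

def pvWitness_coordsFromString : String × (List ((Int × Int) × (Int × Int))) :=
  ("498,4 -> 498,6", [])

def Spec_coordsFromString (string : String) (lines : List ((Int × Int) × (Int × Int))) (out : List ((Int × Int) × (Int × Int))) : Prop := out = coordsFromString_alt string lines
instance (string : String) (lines : List ((Int × Int) × (Int × Int))) (out : List ((Int × Int) × (Int × Int))) : Decidable (Spec_coordsFromString string lines out) := by unfold Spec_coordsFromString; infer_instance

-- ===== CLAIM (what is proved, stated in full; the proofs are below) =====
def Claim_equal_coordsFromString : Prop := ∀ (string : String) (lines : List ((Int × Int) × (Int × Int))), Dom_coordsFromString string lines → Pre_coordsFromString string lines → Spec_coordsFromString string lines (coordsFromString string lines)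

-- ===== LEMMAS AND PROOFS =====

-- A's inline per-token parse equals B's pvParsePoint, for every token (field 0 of a split
-- always exists; a missing field 1 defaults to "" on A's side, and ofStr? "" = none).
theorem parse_token_eq (t : String) :
    ((PySem.Int.ofStr? (PySem.List.pyGetD ((PySem.Str.split? t ",").getD []) 0 "")).getD 0,
     (PySem.Int.ofStr? (PySem.List.pyGetD ((PySem.Str.split? t ",").getD []) 1 "")).getD 0)
      = pvParsePoint t := by
  unfold pvParsePoint
  have he : PySem.Int.ofStr? "" = none := by decide
  cases h0 : PySem.List.pyGet? ((PySem.Str.split? t ",").getD []) 0 with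
  | none =>
      cases h1 : PySem.List.pyGet? ((PySem.Str.split? t ",").getD []) 1 with
      | none => simp [PySem.List.pyGetD, h0, h1, he]
      | some s => simp [PySem.List.pyGetD, h0, h1, he]
  | some s =>
      cases h1 : PySem.List.pyGet? ((PySem.Str.split? t ",").getD []) 1 with
      | none => simp [PySem.List.pyGetD, h0, h1, he]
      | some s' => simp [PySem.List.pyGetD, h0, h1]

-- Pairing consecutive elements by index over range(len-1) is zip with the tail (generic).
theorem range_consec_zip {α β : Type} (g : α → β) (d : α) (xs : List α) :
    (List.range (xs.length - 1)).map
        (fun k => (g (xs.getD k d), g (xs.getD (k + 1) d)))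
      = (xs.map g).zip (xs.map g).tail := by
  induction xs with
  | nil => simp
  | cons a ys ih =>
      cases ys with
      | nil => simp
      | cons b t =>
          have h : (a :: b :: t).length - 1 = ((b :: t).length - 1) + 1 := by
            simp
          rw [h, List.range_succ_eq_map, List.map_cons, List.map_map]
          simp only [Function.comp_def, Nat.succ_eq_add_one, List.getD_cons_succ,
            List.getD_cons_zero, List.map_cons, List.tail_cons, List.zip_cons_cons]
          refine congrArg (List.cons _) ?_
          simpa using ih

-- ===== VERDICT (by name: the statement is the Claim_ definition above) =====
theorem coordsFromString_spec : Claim_equal_coordsFromString := by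
  intro string lines _ _
  unfold Spec_coordsFromString coordsFromString coordsFromString_alt
  set parts := (PySem.Str.split? string " -> ").getD [] with hparts
  simp only []
  rw [PySem.List.foldl_append_singleton_eq_map
        (f := fun i => (((PySem.Int.ofStr? (PySem.List.pyGetD ((PySem.Str.split? (PySem.List.pyGetD parts i "") ",").getD []) 0 "")).getD 0,
                         (PySem.Int.ofStr? (PySem.List.pyGetD ((PySem.Str.split? (PySem.List.pyGetD parts i "") ",").getD []) 1 "")).getD 0),
                        ((PySem.Int.ofStr? (PySem.List.pyGetD ((PySem.Str.split? (PySem.List.pyGetD parts (i+1) "") ",").getD []) 0 "")).getD 0,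
                         (PySem.Int.ofStr? (PySem.List.pyGetD ((PySem.Str.split? (PySem.List.pyGetD parts (i+1) "") ",").getD []) 1 "")).getD 0)))]
  rw [PySem.List.pyRange_one, List.map_map]
  have hcast : ∀ k : Nat, ((0 : Int) + k) = (k : Int) := by intro k; ring
  have hfun : ∀ k : Nat,
      (((fun i : Int => (((PySem.Int.ofStr? (PySem.List.pyGetD ((PySem.Str.split? (PySem.List.pyGetD parts i "") ",").getD []) 0 "")).getD 0,
                          (PySem.Int.ofStr? (PySem.List.pyGetD ((PySem.Str.split? (PySem.List.pyGetD parts i "") ",").getD []) 1 "")).getD 0),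
                         ((PySem.Int.ofStr? (PySem.List.pyGetD ((PySem.Str.split? (PySem.List.pyGetD parts (i+1) "") ",").getD []) 0 "")).getD 0,
                          (PySem.Int.ofStr? (PySem.List.pyGetD ((PySem.Str.split? (PySem.List.pyGetD parts (i+1) "") ",").getD []) 1 "")).getD 0))) ∘
        (fun k : Nat => (0 : Int) + k)) k)
      = (pvParsePoint (parts.getD k ""), pvParsePoint (parts.getD (k+1) "")) := by
    intro k
    simp only [Function.comp, hcast]
    have hk : ((k : Int) + 1) = ((k + 1 : Nat) : Int) := by push_cast; ring
    rw [hk, PySem.List.pyGetD_natCast, PySem.List.pyGetD_natCast,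
        parse_token_eq, parse_token_eq]
  rw [List.map_congr_left (fun k _ => hfun k)]
  have hlen : (((parts.length : Int) - 1 - 0).toNat) = parts.length - 1 := by omega
  rw [hlen, range_consec_zip pvParsePoint "" parts]
  by_cases h2 : parts.length < 2
  · rw [if_pos h2]
    have hz : ((parts.map pvParsePoint).zip (parts.map pvParsePoint).tail).length = 0 := by
      simp [List.length_zip]; omega
    simp [List.eq_nil_of_length_eq_zero hz]
  · rw [if_neg h2]
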